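-- pv_equiv track=rewrite | github.com/tanakaht/atcoder | problems/ahc003/ahc003_a copy.py | get_edge_cnt
-- ===== SOURCE A (Python) =====
-- def get_edge_cnt(s, root):
--     cur_i, cur_j = s
--     res = [0]*60
--     for d in root:
--         if d=='U':
--             res[30+cur_j-1] += 1
--             cur_i -= 1
--         if d=='D':
--             res[30+cur_j] += 1
--             cur_i += 1
--         if d=='L':
--             res[cur_i-1] += 1
--             cur_j -= 1
--         if d=='R':
--             res[cur_i] += 1
--             cur_j += 1
--     return res
-- ===== SOURCE B (Python) =====
-- def get_edge_cnt(s, root):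
--     # Two-pass decomposition: first record the pre-move position of every step,
--     # then tally edge indices from (direction, position) pairs.
--     i, j = s
--     pos = []
--     for d in root:
--         pos.append((i, j))
--         if d == 'U':
--             i -= 1
--         elif d == 'D':
--             i += 1
--         elif d == 'L':
--             j -= 1
--         elif d == 'R':
--             j += 1
--     res = [0] * 60
--     for d, (pi, pj) in zip(root, pos):
--         if d == 'U':
--             res[30 + pj - 1] += 1
--         elif d == 'D':
--             res[30 + pj] += 1
--         elif d == 'L':
--             res[pi - 1] += 1
--         elif d == 'R':
--             res[pi] += 1
--     return res
-- ===== Notes on version B (the rewrite author's own statement) =====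
-- stated objective: alternative
-- what changed: B splits A's single stateful walk into two passes: it first builds the list of pre-move positions, then tallies edge counts by folding over the (direction, position) pairs, instead of mutating position and counter array together in one loop.
import Mathlib
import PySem

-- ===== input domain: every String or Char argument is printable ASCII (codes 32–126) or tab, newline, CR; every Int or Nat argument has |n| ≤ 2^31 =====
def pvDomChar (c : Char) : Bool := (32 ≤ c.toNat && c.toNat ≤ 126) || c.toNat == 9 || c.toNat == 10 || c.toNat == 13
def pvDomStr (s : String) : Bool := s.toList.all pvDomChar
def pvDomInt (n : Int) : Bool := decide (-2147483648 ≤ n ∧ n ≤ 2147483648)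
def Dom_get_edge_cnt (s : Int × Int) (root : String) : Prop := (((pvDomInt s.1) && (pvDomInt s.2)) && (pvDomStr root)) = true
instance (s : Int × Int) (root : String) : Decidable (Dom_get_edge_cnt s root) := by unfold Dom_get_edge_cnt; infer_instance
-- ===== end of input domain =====

-- B tallies the same edge counts in two passes (positions first, then counts) instead of A's
-- single stateful loop; same O(n) cost, different decomposition. Proved equal wherever A returns.

-- res[idx] += 1 (Python semantics; out-of-range is an IndexError, excluded by Pre_ below,
-- so the total form pySetD is exact on the admitted inputs)
def pyBump (res : List Int) (idx : Int) : List Int :=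
  PySem.List.pySetD res idx (PySem.List.pyGetD res idx 0 + 1)

-- ===== PORT A =====
-- A's loop body: the four Python 'if's are mutually exclusive (d is a single char) and are
-- ported in the same order; each branch updates res then the coordinate, as in A.
def stepA (st : Int × Int × List Int) (d : Char) : Int × Int × List Int :=
  match st with
  | (cur_i, cur_j, res) =>
    if d = 'U' then (cur_i - 1, cur_j, pyBump res (30 + cur_j - 1))
    else if d = 'D' then (cur_i + 1, cur_j, pyBump res (30 + cur_j))
    else if d = 'L' then (cur_i, cur_j - 1, pyBump res (cur_i - 1))
    else if d = 'R' then (cur_i, cur_j + 1, pyBump res cur_i)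
    else (cur_i, cur_j, res)

def get_edge_cnt (s : Int × Int) (root : String) : List Int :=
  (root.toList.foldl stepA (s.1, s.2, List.replicate 60 (0 : Int))).2.2

-- ===== PORT B =====
-- B's pass 1 loop body: append the pre-move position, then move
def stepPos (st : (Int × Int) × List (Int × Int)) (d : Char) : (Int × Int) × List (Int × Int) :=
  match st with
  | ((i, j), pos) =>
    if d = 'U' then ((i - 1, j), pos ++ [(i, j)])
    else if d = 'D' then ((i + 1, j), pos ++ [(i, j)])
    else if d = 'L' then ((i, j - 1), pos ++ [(i, j)])
    else if d = 'R' then ((i, j + 1), pos ++ [(i, j)])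
    else ((i, j), pos ++ [(i, j)])

-- B's pass 2 loop body: tally the edge index of one (direction, pre-move position) pair
def stepTally (res : List Int) (dp : Char × Int × Int) : List Int :=
  match dp with
  | (d, pi, pj) =>
    if d = 'U' then pyBump res (30 + pj - 1)
    else if d = 'D' then pyBump res (30 + pj)
    else if d = 'L' then pyBump res (pi - 1)
    else if d = 'R' then pyBump res pi
    else res

def get_edge_cnt_alt (s : Int × Int) (root : String) : List Int :=
  (root.toList.zip
    (root.toList.foldl stepPos ((s.1, s.2), [])).2).foldl
      stepTally (List.replicate 60 (0 : Int))

-- ===== PRECONDITION & SPEC =====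
-- helpers for Pre_ only: the position after a move, and the edge index a step accesses
def pvMove (p : Int × Int) (d : Char) : Int × Int :=
  if d = 'U' then (p.1 - 1, p.2) else if d = 'D' then (p.1 + 1, p.2)
  else if d = 'L' then (p.1, p.2 - 1) else if d = 'R' then (p.1, p.2 + 1) else p

def pvEdgeIdx? (d : Char) (p : Int × Int) : Option Int :=
  if d = 'U' then some (30 + p.2 - 1) else if d = 'D' then some (30 + p.2)
  else if d = 'L' then some (p.1 - 1) else if d = 'R' then some p.1 else none

-- Pre_ excludes exactly the inputs where Python A raises IndexError: some step of the walk
-- accesses res at an index outside [-60, 60) (length 60 with negative-index wraparound).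
def Pre_get_edge_cnt (s : Int × Int) (root : String) : Prop :=
  ((List.range root.toList.length).all (fun k =>
    (pvEdgeIdx? (root.toList.getD k ' ') ((root.toList.take k).foldl pvMove s)).all
      (fun idx => decide (-60 ≤ idx ∧ idx < 60)))) = true
instance (s : Int × Int) (root : String) : Decidable (Pre_get_edge_cnt s root) := by
  unfold Pre_get_edge_cnt; infer_instance

def pvWitness_get_edge_cnt : (Int × Int) × String := ((3, 4), "RRDDLU")

def Spec_get_edge_cnt (s : Int × Int) (root : String) (out : List Int) : Prop := out = get_edge_cnt_alt s root
instance (s : Int × Int) (root : String) (out : List Int) : Decidable (Spec_get_edge_cnt s root out) := by unfold Spec_get_edge_cnt; infer_instance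

-- ===== CLAIM (what is proved, stated in full; the proofs are below) =====
def Claim_equal_get_edge_cnt : Prop := ∀ (s : Int × Int) (root : String), Dom_get_edge_cnt s root → Pre_get_edge_cnt s root → Spec_get_edge_cnt s root (get_edge_cnt s root)

-- ===== LEMMAS AND PROOFS =====
-- trajectory of pre-move positions, recursively (proof-side reformulation of B's pass 1)
def trajRec (p : Int × Int) (l : List Char) : List (Int × Int) :=
  match l with
  | [] => []
  | d :: t => p :: trajRec (pvMove p d) t

lemma traj_fold (l : List Char) : ∀ (p : Int × Int) (acc : List (Int × Int)),
    (l.foldl stepPos (p, acc)).2 = acc ++ trajRec p l := by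
  induction l with
  | nil => intro p acc; simp [trajRec]
  | cons d t ih =>
    intro p acc
    simp only [List.foldl_cons, trajRec]
    by_cases hU : d = 'U' <;> by_cases hD : d = 'D' <;> by_cases hL : d = 'L' <;>
      by_cases hR : d = 'R' <;> simp_all [stepPos, pvMove]

lemma main_fold (l : List Char) : ∀ (i j : Int) (res : List Int),
    (l.foldl stepA (i, j, res)).2.2
    = (l.zip (trajRec (i, j) l)).foldl stepTally res := by
  induction l with
  | nil => intro i j res; simp
  | cons d t ih =>
    intro i j res
    simp only [trajRec, List.zip_cons_cons, List.foldl_cons]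
    by_cases hU : d = 'U' <;> by_cases hD : d = 'D' <;> by_cases hL : d = 'L' <;>
      by_cases hR : d = 'R' <;> simp_all [stepA, stepTally, pvMove]

-- ===== VERDICT (by name: the statement is the Claim_ definition above) =====
theorem get_edge_cnt_spec : Claim_equal_get_edge_cnt := by
  intro s root _ _
  unfold Spec_get_edge_cnt get_edge_cnt get_edge_cnt_alt
  rw [main_fold, traj_fold]
  rfl
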